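-- pv_equiv track=rewrite | github.com/ARUNKAILASH/python-programs | Conflict Pair Problem.py | max_expertise
-- ===== SOURCE A (Python) =====
-- def max_expertise(n, c, cons, exp):
--     dp = [0]*(1<<n)
--     con = [0]*n
--     for i in range(c):
--         con[cons[i][0]-1] |= (1<<(cons[i][1]-1))
--         con[cons[i][1]-1] |= (1<<(cons[i][0]-1))
--     for mask in range(1, 1<<n):
--         not_in_mask = ((1<<n)-1)^mask
--         for i in range(n):
--             if (mask>>i)&1:
--                 new_mask = mask^(1<<i)
--                 if (not_in_mask & con[i]) == 0:
--                     dp[mask] = max(dp[mask], dp[new_mask] + exp[i])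
--     return max(dp)
-- ===== SOURCE B (Python) =====
-- def max_expertise(n, c, cons, exp):
--     con = [0] * n
--     for i in range(c):
--         a = cons[i][0] - 1
--         b = cons[i][1] - 1
--         con[a] |= 1 << b
--         con[b] |= 1 << a
--     full = (1 << n) - 1
--     memo = {}
--
--     def f(mask):
--         v = memo.get(mask)
--         if v is not None:
--             return v
--         rest = full ^ mask
--         best = 0
--         for i in range(n):
--             if (mask >> i) & 1 and rest & con[i] == 0:
--                 best = max(best, f(mask ^ (1 << i)) + exp[i])
--         memo[mask] = best
--         return best
--
--     return max(f(mask) for mask in range(1 << n))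
-- ===== Notes on version B (the rewrite author's own statement) =====
-- stated objective: alternative
-- what changed: Replaces the bottom-up dp-table sweep over all masks with a top-down memoized recursion f(mask) (dict memo, explicit recursion on the mask with the low-bit cleared), keeping the conflict-mask construction and the final max over all masks.
import Mathlib
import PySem

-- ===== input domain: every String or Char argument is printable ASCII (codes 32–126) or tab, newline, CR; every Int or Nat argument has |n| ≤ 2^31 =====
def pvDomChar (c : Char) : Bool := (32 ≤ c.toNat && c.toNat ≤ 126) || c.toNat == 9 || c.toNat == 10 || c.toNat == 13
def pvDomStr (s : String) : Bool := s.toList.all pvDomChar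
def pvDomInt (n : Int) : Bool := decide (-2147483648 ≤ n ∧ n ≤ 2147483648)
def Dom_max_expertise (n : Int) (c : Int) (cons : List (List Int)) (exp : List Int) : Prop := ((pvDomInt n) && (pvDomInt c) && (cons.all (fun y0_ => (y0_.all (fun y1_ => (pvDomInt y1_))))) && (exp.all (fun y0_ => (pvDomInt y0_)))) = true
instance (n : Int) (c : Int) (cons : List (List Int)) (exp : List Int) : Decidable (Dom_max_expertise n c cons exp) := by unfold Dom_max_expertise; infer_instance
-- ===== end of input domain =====

-- B replaces A's bottom-up dp-table sweep by a top-down memoized recursion over masks; alternative decomposition, same result.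

-- ===== PORT A =====
-- shared helper of both Pythons' first loop: the conflict-adjacency masks con[]
def pvBuildCon (n : Int) (c : Int) (cons : List (List Int)) : List Nat :=
  (List.range c.toNat).foldl (fun con i =>
    let p := cons.getD i []
    let a := (p.getD 0 0 - 1).toNat
    let b := (p.getD 1 0 - 1).toNat
    let con1 := con.set a (con.getD a 0 ||| (1 <<< b))
    con1.set b (con1.getD b 0 ||| (1 <<< a)))
    (List.replicate n.toNat 0)

def max_expertise (n : Int) (c : Int) (cons : List (List Int)) (exp : List Int) : Int :=
  let N := n.toNat
  let con := pvBuildCon n c cons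
  let dp :=
    (List.range' 1 (2 ^ N - 1)).foldl (fun dp mask =>
      let notIn := (2 ^ N - 1) ^^^ mask
      (List.range N).foldl (fun dp i =>
        if (mask >>> i) &&& 1 == 1 then
          let newMask := mask ^^^ (1 <<< i)
          if notIn &&& con.getD i 0 == 0 then
            dp.set mask (max (dp.getD mask 0) (dp.getD newMask 0 + exp.getD i 0))
          else dp
        else dp) dp)
      (List.replicate (2 ^ N) (0 : Int))
  (PySem.List.max? dp (fun y => y)).getD 0

-- ===== PORT B =====
-- f(mask) with the memo dict threaded through; fuel (mask+1 at each top-level call) only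
-- makes the recursion structural — every recursive call strictly decreases the mask.
def pvFB (n full : Nat) (con : List Nat) (exp : List Int) :
    Nat → PySem.Dict Nat Int → Nat → Int × PySem.Dict Nat Int
  | 0, memo, _ => (0, memo)
  | fuel + 1, memo, mask =>
    match PySem.Dict.get? memo mask with
    | some v => (v, memo)
    | none =>
      let rest := full ^^^ mask
      let r := (List.range n).foldl (fun (bm : Int × PySem.Dict Nat Int) i =>
        if (mask >>> i) &&& 1 == 1 && rest &&& con.getD i 0 == 0 then
          let vm := pvFB n full con exp fuel bm.2 (mask ^^^ (1 <<< i))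
          (max bm.1 (vm.1 + exp.getD i 0), vm.2)
        else bm) (0, memo)
      (r.1, PySem.Dict.insert r.2 mask r.1)

def max_expertise_alt (n : Int) (c : Int) (cons : List (List Int)) (exp : List Int) : Int :=
  let N := n.toNat
  let con := pvBuildCon n c cons
  let full := 2 ^ N - 1
  let vals :=
    ((List.range (2 ^ N)).foldl (fun (am : List Int × PySem.Dict Nat Int) mask =>
      let vm := pvFB N full con exp (mask + 1) am.2 mask
      (am.1 ++ [vm.1], vm.2)) ([], PySem.Dict.empty)).1
  (PySem.List.max? vals (fun y => y)).getD 0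

-- ===== PRECONDITION & SPEC =====
-- Pre_ excludes exactly the inputs where Python A raises: a negative n (ValueError on 1<<n),
-- too few conflict pairs or pairs shorter than 2 (IndexError), a pair value outside 1..n
-- (IndexError on con[...] or ValueError on a negative shift), or exp shorter than n (IndexError).
def Pre_max_expertise (n : Int) (c : Int) (cons : List (List Int)) (exp : List Int) : Prop :=
  0 ≤ n ∧ n ≤ (exp.length : Int) ∧ c ≤ (cons.length : Int) ∧
  ∀ p ∈ cons.take c.toNat, 2 ≤ p.length ∧
    1 ≤ p.getD 0 0 ∧ p.getD 0 0 ≤ n ∧ 1 ≤ p.getD 1 0 ∧ p.getD 1 0 ≤ n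
instance (n : Int) (c : Int) (cons : List (List Int)) (exp : List Int) : Decidable (Pre_max_expertise n c cons exp) := by unfold Pre_max_expertise; infer_instance

def pvWitness_max_expertise : Int × Int × List (List Int) × List Int := (2, 1, [[1, 2]], [3, 4])

def Spec_max_expertise (n : Int) (c : Int) (cons : List (List Int)) (exp : List Int) (out : Int) : Prop := out = max_expertise_alt n c cons exp
instance (n : Int) (c : Int) (cons : List (List Int)) (exp : List Int) (out : Int) : Decidable (Spec_max_expertise n c cons exp out) := by unfold Spec_max_expertise; infer_instance

-- ===== CLAIM (what is proved, stated in full; the proofs are below) =====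
def Claim_equal_max_expertise : Prop := ∀ (n : Int) (c : Int) (cons : List (List Int)) (exp : List Int), Dom_max_expertise n c cons exp → Pre_max_expertise n c cons exp → Spec_max_expertise n c cons exp (max_expertise n c cons exp)

-- ===== LEMMAS AND PROOFS =====

def pvGF (n full : Nat) (con : List Nat) (exp : List Int) : Nat → Nat → Int
  | 0, _ => 0
  | fuel + 1, mask =>
    (List.range n).foldl (fun best i =>
      if (mask >>> i) &&& 1 == 1 && (full ^^^ mask) &&& con.getD i 0 == 0 then
        max best (pvGF n full con exp fuel (mask ^^^ (1 <<< i)) + exp.getD i 0)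
      else best) 0

def pvG (n full : Nat) (con : List Nat) (exp : List Int) (mask : Nat) : Int :=
  pvGF n full con exp (mask + 1) mask

lemma pv_testBit {mask i : Nat} (h : ((mask >>> i) &&& 1 == 1) = true) : mask.testBit i = true := by
  simp [Nat.testBit, Nat.and_comm] at *; omega

lemma pv_xor_lt {mask i : Nat} (h : ((mask >>> i) &&& 1 == 1) = true) : mask ^^^ (1 <<< i) < mask := by
  have hb := pv_testBit h
  rw [Nat.one_shiftLeft]
  apply Nat.lt_of_testBit i
  · simp [Nat.testBit_xor, hb]
  · exact hb
  · intro j hj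
    simp [Nat.testBit_xor, Nat.ne_of_lt hj]

lemma pvGF_congr (n full : Nat) (con : List Nat) (exp : List Int) :
    ∀ mask fuel1 fuel2, mask < fuel1 → mask < fuel2 →
      pvGF n full con exp fuel1 mask = pvGF n full con exp fuel2 mask := by
  intro mask
  induction mask using Nat.strong_induction_on with
  | _ mask ih =>
    intro fuel1 fuel2 h1 h2
    match fuel1, fuel2 with
    | f1 + 1, f2 + 1 =>
      simp only [pvGF]
      apply PySem.List.foldl_congr_mem
      intro acc i _
      by_cases hc : ((mask >>> i) &&& 1 == 1 && (full ^^^ mask) &&& con.getD i 0 == 0) = true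
      · rw [if_pos hc, if_pos hc]
        have hbit : ((mask >>> i) &&& 1 == 1) = true := by
          simp at hc; exact (by simp [hc.1])
        have hlt := pv_xor_lt hbit
        rw [ih _ hlt f1 f2 (by omega) (by omega)]
      · rw [if_neg hc, if_neg hc]

lemma pvG_eq (n full : Nat) (con : List Nat) (exp : List Int) (mask : Nat) :
    pvG n full con exp mask =
      (List.range n).foldl (fun best i =>
        if (mask >>> i) &&& 1 == 1 && (full ^^^ mask) &&& con.getD i 0 == 0 then
          max best (pvG n full con exp (mask ^^^ (1 <<< i)) + exp.getD i 0)
        else best) 0 := by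
  show pvGF n full con exp (mask + 1) mask = _
  simp only [pvGF]
  apply PySem.List.foldl_congr_mem
  intro acc i _
  by_cases hc : ((mask >>> i) &&& 1 == 1 && (full ^^^ mask) &&& con.getD i 0 == 0) = true
  · rw [if_pos hc, if_pos hc]
    have hbit : ((mask >>> i) &&& 1 == 1) = true := by
      simp at hc; exact (by simp [hc.1])
    have hlt := pv_xor_lt hbit
    rw [pvGF_congr n full con exp _ mask ((mask ^^^ (1 <<< i)) + 1) (by omega) (by omega)]
    rfl
  · rw [if_neg hc, if_neg hc]

lemma pvG_zero (n full : Nat) (con : List Nat) (exp : List Int) :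
    pvG n full con exp 0 = 0 := by
  rw [pvG_eq]
  rw [PySem.List.foldl_congr_mem (List.range n) _ (fun b _ => b) 0 (by intro acc i _; simp)]
  induction (List.range n) with
  | nil => rfl
  | cons a l ihl => simp only [List.foldl_cons]; exact ihl

def pvCoh (n full : Nat) (con : List Nat) (exp : List Int) (memo : PySem.Dict Nat Int) : Prop :=
  ∀ k v, PySem.Dict.get? memo k = some v → v = pvG n full con exp k

lemma pvFB_ok (n full : Nat) (con : List Nat) (exp : List Int) :
    ∀ fuel mask memo, mask < fuel → pvCoh n full con exp memo →
      (pvFB n full con exp fuel memo mask).1 = pvG n full con exp mask ∧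
      pvCoh n full con exp (pvFB n full con exp fuel memo mask).2 := by
  intro fuel
  induction fuel with
  | zero => intro mask memo h _; omega
  | succ f ihf =>
    intro mask memo hlt hcoh
    simp only [pvFB]
    cases hm : PySem.Dict.get? memo mask with
    | some v => exact ⟨hcoh mask v hm, hcoh⟩
    | none =>
      have inner : ∀ (l : List Nat), ∀ (best : Int) memo', pvCoh n full con exp memo' →
          ((l.foldl (fun (bm : Int × PySem.Dict Nat Int) i =>
            if (mask >>> i) &&& 1 == 1 && (full ^^^ mask) &&& con.getD i 0 == 0 then
              let vm := pvFB n full con exp f bm.2 (mask ^^^ (1 <<< i))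
              (max bm.1 (vm.1 + exp.getD i 0), vm.2)
            else bm) (best, memo')).1 =
            l.foldl (fun best i =>
              if (mask >>> i) &&& 1 == 1 && (full ^^^ mask) &&& con.getD i 0 == 0 then
                max best (pvG n full con exp (mask ^^^ (1 <<< i)) + exp.getD i 0)
              else best) best) ∧
          pvCoh n full con exp ((l.foldl (fun (bm : Int × PySem.Dict Nat Int) i =>
            if (mask >>> i) &&& 1 == 1 && (full ^^^ mask) &&& con.getD i 0 == 0 then
              let vm := pvFB n full con exp f bm.2 (mask ^^^ (1 <<< i))
              (max bm.1 (vm.1 + exp.getD i 0), vm.2)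
            else bm) (best, memo')).2) := by
        intro l
        induction l with
        | nil => intro best memo' h; exact ⟨rfl, h⟩
        | cons i t iht =>
          intro best memo' hc'
          simp only [List.foldl_cons]
          by_cases hcnd : ((mask >>> i) &&& 1 == 1 && (full ^^^ mask) &&& con.getD i 0 == 0) = true
          · rw [if_pos hcnd, if_pos hcnd]
            have hbit : ((mask >>> i) &&& 1 == 1) = true := by
              simp at hcnd; exact (by simp [hcnd.1])
            have hxlt := pv_xor_lt hbit
            obtain ⟨h1, h2⟩ := ihf (mask ^^^ (1 <<< i)) memo' (by omega) hc'
            rw [← h1]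
            exact iht _ _ h2
          · rw [if_neg hcnd, if_neg hcnd]
            exact iht best memo' hc'
      obtain ⟨h1, h2⟩ := inner (List.range n) 0 memo hcoh
      refine ⟨by rw [pvG_eq]; exact h1, ?_⟩
      intro k v hget
      by_cases hk : k = mask
      · subst hk
        rw [PySem.Dict.get?_insert_self] at hget
        cases hget
        rw [h1, pvG_eq]
      · rw [PySem.Dict.get?_insert_of_ne _ _ hk] at hget
        exact h2 k v hget

lemma pv_getD_set (l : List Int) (i k : Nat) (v : Int) :
    (l.set i v).getD k 0 = if k = i ∧ i < l.length then v else l.getD k 0 := by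
  simp only [List.getD_eq_getElem?_getD, List.getElem?_set]
  split_ifs with h1 h2 h3 h4 <;> simp_all

lemma pvInnerA (con : List Nat) (exp : List Int) (notIn mask : Nat) :
    ∀ (l : List Nat) (dp : List Int) (acc : Int), mask < dp.length →
      l.foldl (fun dp i =>
        if (mask >>> i) &&& 1 == 1 then
          if notIn &&& con.getD i 0 == 0 then
            dp.set mask (max (dp.getD mask 0) (dp.getD (mask ^^^ (1 <<< i)) 0 + exp.getD i 0))
          else dp
        else dp) (dp.set mask acc) =
      dp.set mask (l.foldl (fun b i =>
        if (mask >>> i) &&& 1 == 1 && notIn &&& con.getD i 0 == 0 then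
          max b (dp.getD (mask ^^^ (1 <<< i)) 0 + exp.getD i 0)
        else b) acc) := by
  intro l
  induction l with
  | nil => intro dp acc hm; rfl
  | cons i t iht =>
    intro dp acc hm
    simp only [List.foldl_cons]
    by_cases hbit : ((mask >>> i) &&& 1 == 1) = true
    · rw [if_pos hbit]
      by_cases hcon : (notIn &&& con.getD i 0 == 0) = true
      · have hne : mask ^^^ (1 <<< i) ≠ mask := Nat.ne_of_lt (pv_xor_lt hbit)
        rw [if_pos hcon, if_pos (by rw [Bool.and_eq_true]; exact ⟨hbit, hcon⟩)]
        have e1 : (dp.set mask acc).getD mask 0 = acc := by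
          rw [pv_getD_set]; simp [hm]
        have e2 : (dp.set mask acc).getD (mask ^^^ (1 <<< i)) 0 = dp.getD (mask ^^^ (1 <<< i)) 0 := by
          rw [pv_getD_set]; simp [hne]
        rw [e1, e2, List.set_set]
        exact iht dp (max acc (dp.getD (mask ^^^ (1 <<< i)) 0 + exp.getD i 0)) hm
      · rw [if_neg hcon, if_neg (by rw [Bool.and_eq_true]; exact fun h => hcon h.2)]
        exact iht dp acc hm
    · rw [if_neg hbit, if_neg (by rw [Bool.and_eq_true]; exact fun h => hbit h.1)]
      exact iht dp acc hm

lemma pvOuterA (N : Nat) (con : List Nat) (exp : List Int) :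
    ∀ (cnt M : Nat) (dp : List Int), 1 ≤ M → M + cnt = 2 ^ N → dp.length = 2 ^ N →
      (∀ k, dp.getD k 0 = if k < M then pvG N (2 ^ N - 1) con exp k else 0) →
      ((List.range' M cnt).foldl (fun dp mask =>
          (List.range N).foldl (fun dp i =>
            if (mask >>> i) &&& 1 == 1 then
              if ((2 ^ N - 1) ^^^ mask) &&& con.getD i 0 == 0 then
                dp.set mask (max (dp.getD mask 0) (dp.getD (mask ^^^ (1 <<< i)) 0 + exp.getD i 0))
              else dp
            else dp) dp) dp).length = 2 ^ N ∧
      ∀ k, ((List.range' M cnt).foldl (fun dp mask =>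
          let notIn := (2 ^ N - 1) ^^^ mask
          (List.range N).foldl (fun dp i =>
            if (mask >>> i) &&& 1 == 1 then
              let newMask := mask ^^^ (1 <<< i)
              if notIn &&& con.getD i 0 == 0 then
                dp.set mask (max (dp.getD mask 0) (dp.getD newMask 0 + exp.getD i 0))
              else dp
            else dp) dp) dp).getD k 0 = if k < 2 ^ N then pvG N (2 ^ N - 1) con exp k else 0 := by
  intro cnt
  induction cnt with
  | zero =>
    intro M dp h1 h2 h3 h4
    simp only [List.range'_zero, List.foldl_nil]
    refine ⟨h3, fun k => ?_⟩
    rw [h4 k, show M = 2 ^ N by omega]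
  | succ cnt ihc =>
    intro M dp h1 h2 h3 h4
    simp only [List.range'_succ, List.foldl_cons]
    have hM : M < 2 ^ N := by omega
    have hMlen : M < dp.length := by omega
    have h0 : dp.set M (0 : Int) = dp := by
      have := h4 M
      rw [if_neg (by omega)] at this
      rw [← this, List.getD_eq_getElem dp 0 hMlen, List.set_getElem_self]
    have hstep : (List.range N).foldl (fun dp i =>
        if M >>> i &&& 1 == 1 then
          if ((2 ^ N - 1) ^^^ M) &&& con.getD i 0 == 0 then
            dp.set M (max (dp.getD M 0) (dp.getD (M ^^^ (1 <<< i)) 0 + exp.getD i 0))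
          else dp
        else dp) dp =
        dp.set M ((List.range N).foldl (fun b i =>
          if (M >>> i) &&& 1 == 1 && ((2 ^ N - 1) ^^^ M) &&& con.getD i 0 == 0 then
            max b (dp.getD (M ^^^ (1 <<< i)) 0 + exp.getD i 0)
          else b) 0) := by
      conv_lhs => rw [← h0]
      exact pvInnerA con exp ((2 ^ N - 1) ^^^ M) M (List.range N) dp 0 hMlen
    rw [hstep]
    have hw : (List.range N).foldl (fun b i =>
        if (M >>> i) &&& 1 == 1 && ((2 ^ N - 1) ^^^ M) &&& con.getD i 0 == 0 then
          max b (dp.getD (M ^^^ (1 <<< i)) 0 + exp.getD i 0)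
        else b) 0 = pvG N (2 ^ N - 1) con exp M := by
      rw [pvG_eq]
      apply PySem.List.foldl_congr_mem
      intro acc i _
      by_cases hc : ((M >>> i) &&& 1 == 1 && ((2 ^ N - 1) ^^^ M) &&& con.getD i 0 == 0) = true
      · rw [if_pos hc, if_pos hc]
        have hbit : ((M >>> i) &&& 1 == 1) = true := by
          simp at hc; exact (by simp [hc.1])
        have hxlt := pv_xor_lt hbit
        rw [h4 (M ^^^ (1 <<< i)), if_pos (by omega)]
      · rw [if_neg hc, if_neg hc]
    rw [hw]
    apply ihc (M + 1) _ (by omega) (by omega) (by simp [h3])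
    intro k
    rw [pv_getD_set, h4 k]
    split_ifs with hA hB hC <;> first
      | rfl
      | (exfalso; omega)
      | (obtain ⟨hk, _⟩ := hA; rw [hk])

lemma pvB_vals (n full : Nat) (con : List Nat) (exp : List Int) :
    ∀ (l : List Nat) (acc : List Int) memo, pvCoh n full con exp memo →
      (l.foldl (fun (am : List Int × PySem.Dict Nat Int) mask =>
        let vm := pvFB n full con exp (mask + 1) am.2 mask
        (am.1 ++ [vm.1], vm.2)) (acc, memo)).1 = acc ++ l.map (pvG n full con exp) := by
  intro l
  induction l with
  | nil => intro acc memo h; simp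
  | cons m t iht =>
    intro acc memo h
    simp only [List.foldl_cons, List.map_cons]
    obtain ⟨h1, h2⟩ := pvFB_ok n full con exp (m + 1) m memo (by omega) h
    rw [iht _ _ h2, h1]
    simp

lemma pvA_eq (n c : Int) (cons : List (List Int)) (exp : List Int) :
    max_expertise n c cons exp =
      (PySem.List.max? ((List.range (2 ^ n.toNat)).map
        (pvG n.toNat (2 ^ n.toNat - 1) (pvBuildCon n c cons) exp)) (fun y => y)).getD 0 := by
  simp only [max_expertise]
  obtain ⟨hlen, hinv⟩ := pvOuterA n.toNat (pvBuildCon n c cons) exp (2 ^ n.toNat - 1) 1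
      (List.replicate (2 ^ n.toNat) (0 : Int)) le_rfl
      (by have := Nat.one_le_two_pow (n := n.toNat); omega) (by simp)
      (fun k => by
        have hz : (List.replicate (2 ^ n.toNat) (0 : Int)).getD k 0 = 0 := by
          simp [List.getD_eq_getElem?_getD, List.getElem?_replicate]
          split_ifs <;> rfl
        rw [hz]
        split_ifs with hk
        · rw [show k = 0 by omega, pvG_zero]
        · rfl)
  congr 2
  apply List.ext_getElem (by rw [List.length_map, List.length_range]; exact hlen)
  intro k h1 h2
  rw [← List.getD_eq_getElem _ 0 h1, hinv k, if_pos (by simpa using h2)]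
  simp

lemma pvB_eq (n c : Int) (cons : List (List Int)) (exp : List Int) :
    max_expertise_alt n c cons exp =
      (PySem.List.max? ((List.range (2 ^ n.toNat)).map
        (pvG n.toNat (2 ^ n.toNat - 1) (pvBuildCon n c cons) exp)) (fun y => y)).getD 0 := by
  simp only [max_expertise_alt]
  rw [pvB_vals n.toNat (2 ^ n.toNat - 1) (pvBuildCon n c cons) exp (List.range (2 ^ n.toNat))
      [] PySem.Dict.empty (fun k v h => by simp [PySem.Dict.get?_empty] at h)]
  simp

-- ===== VERDICT (by name: the statement is the Claim_ definition above) =====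
theorem max_expertise_spec : Claim_equal_max_expertise := by
  intro n c cons exp _ _
  unfold Spec_max_expertise
  rw [pvA_eq, pvB_eq]
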